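-- pv_equiv track=rewrite | github.com/miliar/Code_Jam_Webscraper | solutions_python/Problem_193/27.py | is_ok2
-- ===== SOURCE A (Python) =====
-- from itertools import product, combinations, permutations
--
-- def can_cover(N, workers, know):
--     res = set()
--     options = product(range(N), repeat=len(workers))
--     for o in options:
--         if all(know[workers[i]][o[i]] == "1" for i in range(len(o))):
--             if len(set(o)) == len(o):
--                 res.add(tuple(sorted(list(o))))
--     return res
--
-- def is_ok2(N, after):
--     for i in range(N + 1):
--         for w1 in combinations(range(N), i):
--             w2 = tuple(sorted(list(set(range(N)) - set(w1))))
--             cc1 = can_cover(N, w1, after)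
--             cc2 = can_cover(N, w2, after)
--             for c in cc1:
--                 c2 = tuple(sorted(list(set(range(N)) - set(c))))
--                 if c2 not in cc2:
--                     return False
--     return True
-- ===== SOURCE B (Python) =====
-- def is_ok2(N, after):
--     def pm(ws, ss):
--         # can workers ws be matched bijectively onto skills ss?
--         # naive recursive matching search: pick a skill for the first worker, recurse
--         if not ws:
--             return not ss
--         w, rest = ws[0], ws[1:]
--         return any(after[w][j] == "1" and pm(rest, [x for x in ss if x != j])
--                    for j in ss)
--
--     def subsets(xs):
--         # all sublists of xs, built recursively
--         if not xs:
--             return [[]]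
--         subs = subsets(xs[1:])
--         return subs + [[xs[0]] + s for s in subs]
--
--     skills = list(range(N))
--     for ws in subsets(skills):
--         wrest = [w for w in skills if w not in ws]
--         for ss in subsets(skills):
--             if pm(ws, ss) and not pm(wrest, [j for j in skills if j not in ss]):
--                 return False
--     return True
-- ===== Notes on version B (the rewrite author's own statement) =====
-- stated objective: alternative
-- what changed: B never materialises the sets of coverable skill-tuples: instead of enumerating the full N^k product per worker subset and filtering repeated columns (A's can_cover), B decides matchability of each (worker-subset, skill-subset) pair by a recursive backtracking search that assigns the first worker a skill and recurses on the remaining skills, and generates subsets in one recursive pass instead of combinations per size.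
-- outside the precondition, e.g. on is_ok2(2, ['00', '']): A returns False, B returns False
import Mathlib
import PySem

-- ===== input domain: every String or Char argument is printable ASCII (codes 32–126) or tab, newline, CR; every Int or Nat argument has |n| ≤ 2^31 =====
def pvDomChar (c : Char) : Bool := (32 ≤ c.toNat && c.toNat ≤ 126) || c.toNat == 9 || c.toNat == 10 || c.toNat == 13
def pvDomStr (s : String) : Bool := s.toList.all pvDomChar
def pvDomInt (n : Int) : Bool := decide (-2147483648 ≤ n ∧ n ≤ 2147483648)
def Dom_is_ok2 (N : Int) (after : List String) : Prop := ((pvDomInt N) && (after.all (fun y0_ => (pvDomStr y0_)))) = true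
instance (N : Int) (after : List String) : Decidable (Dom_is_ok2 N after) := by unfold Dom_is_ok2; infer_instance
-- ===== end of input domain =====

-- B replaces A's materialised sets of coverable skill-tuples (full N^k product filtered for
-- repeated columns) by a recursive backtracking matchability test per (worker-subset,
-- skill-subset) pair, with subsets generated in one recursive pass; objective: alternative.


-- ===== PORT A =====
-- itertools.product(range(N), repeat=k), in itertools order (first coordinate varies slowest)
def pvProdRep (N : Int) : Nat → List (List Int)
  | 0 => [[]]
  | k+1 => (PySem.List.pyRange 0 N 1).flatMap (fun x => (pvProdRep N k).map (x :: ·))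

-- know[w][j] == "1"   (none = IndexError; false there — those inputs are outside Pre_)
def pvEntryA (know : List String) (w j : Int) : Bool :=
  match PySem.List.pyGet? know w with
  | some row =>
    match PySem.Str.pyGet? row j with
    | some c => c == '1'
    | none => false
  | none => false

-- all(know[workers[i]][o[i]] == "1" for i in range(len(o)))
def pvAllA (know : List String) (workers o : List Int) : Bool :=
  (List.range o.length).all (fun i =>
    match PySem.List.pyGet? workers (i : Int), PySem.List.pyGet? o (i : Int) with
    | some w, some j => pvEntryA know w j
    | _, _ => false)

-- can_cover(N, workers, know)
def pvCanCover (N : Int) (workers : List Int) (know : List String) : PySem.Set (List Int) :=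
  (pvProdRep N workers.length).foldl
    (fun res o =>
      if pvAllA know workers o then
        if PySem.Set.len (PySem.Set.ofList o) == (o.length : Int) then
          res.add (PySem.List.sorted o (fun x => x))
        else res
      else res)
    PySem.Set.empty

-- tuple(sorted(list(set(range(N)) - set(xs))))  (the expression A uses for both w2 and c2)
def pvCompSorted (N : Int) (xs : List Int) : List Int :=
  PySem.List.sorted
    (PySem.Set.diff (PySem.Set.ofList (PySem.List.pyRange 0 N 1)) (PySem.Set.ofList xs))
    (fun x => x)

def is_ok2 (N : Int) (after : List String) : Bool :=
  (PySem.List.pyRange 0 (N+1) 1).all (fun i =>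
    (PySem.List.combinations (PySem.List.pyRange 0 N 1) i.toNat).all (fun w1 =>
      let w2 := pvCompSorted N w1
      let cc1 := pvCanCover N w1 after
      let cc2 := pvCanCover N w2 after
      cc1.all (fun c => decide (pvCompSorted N c ∈ cc2))))

-- ===== PORT B =====
-- after[w][j] == "1"
def pvEntryB (after : List String) (w j : Int) : Bool :=
  match PySem.List.pyGet? after w with
  | some row =>
    match PySem.Str.pyGet? row j with
    | some c => c == '1'
    | none => false
  | none => false

-- pm(ws, ss): recursive backtracking matchability test
def pvPm (after : List String) : List Int → List Int → Bool
  | [], ss => ss.isEmpty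
  | w :: rest, ss =>
    ss.any (fun j => pvEntryB after w j && pvPm after rest (ss.filter (fun x => decide (x ≠ j))))

-- subsets(xs): all sublists, built recursively
def pvSubsets : List Int → List (List Int)
  | [] => [[]]
  | x :: xs =>
    let subs := pvSubsets xs
    subs ++ subs.map (fun s => x :: s)

def is_ok2_alt (N : Int) (after : List String) : Bool :=
  let skills := PySem.List.pyRange 0 N 1
  (pvSubsets skills).all (fun ws =>
    let wrest := skills.filter (fun w => decide (w ∉ ws))
    (pvSubsets skills).all (fun ss =>
      !(pvPm after ws ss && !(pvPm after wrest (skills.filter (fun j => decide (j ∉ ss)))))))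

-- ===== PRECONDITION & SPEC =====
-- A indexes after[w][j] for w, j in range(N); Pre_ demands those indices exist. It thereby also
-- excludes some inputs with a short/missing later row on which A happens to return False before
-- reaching that row (see the claim's cite); B returns the same False on those sampled inputs.
def Pre_is_ok2 (N : Int) (after : List String) : Prop :=
  N ≤ (after.length : Int) ∧ ∀ s ∈ after.take N.toNat, N ≤ (s.length : Int)
instance (N : Int) (after : List String) : Decidable (Pre_is_ok2 N after) := by
  unfold Pre_is_ok2; infer_instance

def pvWitness_is_ok2 : Int × List String := (2, ["10", "01"])

def Spec_is_ok2 (N : Int) (after : List String) (out : Bool) : Prop := out = is_ok2_alt N after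
instance (N : Int) (after : List String) (out : Bool) : Decidable (Spec_is_ok2 N after out) := by
  unfold Spec_is_ok2; infer_instance

-- ===== CLAIM (what is proved, stated in full; the proofs are below) =====
def Claim_equal_is_ok2 : Prop := ∀ (N : Int) (after : List String), Dom_is_ok2 N after → Pre_is_ok2 N after → Spec_is_ok2 N after (is_ok2 N after)

-- ===== LEMMAS AND PROOFS =====

-- PySem.Set.ofList xs is a sublist of xs
theorem pvOfList_sublist {α : Type} [BEq α] [LawfulBEq α] (xs : List α) :
    (PySem.Set.ofList xs).Sublist xs := by
  induction xs with
  | nil => simp [PySem.Set.ofList]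
  | cons x xs ih =>
    rw [PySem.Set.ofList_cons]
    refine List.Sublist.cons₂ x (List.Sublist.trans ?_ ih)
    show (List.filter _ (PySem.Set.ofList xs)).Sublist _
    exact List.filter_sublist

-- len(set(o)) == len(o) decides Nodup
theorem pvDistinct_iff (o : List Int) :
    ((PySem.Set.len (PySem.Set.ofList o) == (o.length : Int)) = true) ↔ o.Nodup := by
  rw [beq_iff_eq]
  show ((PySem.Set.ofList o).length : Int) = (o.length : Int) ↔ _
  constructor
  · intro h
    have hlen : (PySem.Set.ofList o).length = o.length := by exact_mod_cast h
    have := (pvOfList_sublist o).eq_of_length hlen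
    have hnd := PySem.Set.nodup_ofList (xs := o)
    rwa [this] at hnd
  · intro h
    rw [PySem.Set.ofList_eq_self_of_nodup o h]

-- membership in product(range(N), repeat=k)
theorem pvMem_prodRep (N : Int) (k : Nat) (o : List Int) :
    o ∈ pvProdRep N k ↔ o.length = k ∧ ∀ j ∈ o, j ∈ PySem.List.pyRange 0 N 1 := by
  induction k generalizing o with
  | zero =>
    simp only [pvProdRep, List.mem_singleton, List.length_eq_zero_iff]
    constructor
    · rintro rfl; simp
    · rintro ⟨rfl, -⟩; rfl
  | succ k ih =>
    simp only [pvProdRep, List.mem_flatMap, List.mem_map]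
    constructor
    · rintro ⟨x, hx, t, ht, rfl⟩
      obtain ⟨hlen, hall⟩ := (ih t).mp ht
      refine ⟨by simp [hlen], ?_⟩
      intro j hj
      rcases List.mem_cons.mp hj with rfl | hj
      · exact hx
      · exact hall j hj
    · rintro ⟨hlen, hall⟩
      cases o with
      | nil => simp at hlen
      | cons x t =>
        refine ⟨x, hall x (by simp), t, (ih t).mpr ⟨by simpa using hlen, ?_⟩, rfl⟩
        intro j hj; exact hall j (by simp [hj])

-- index-driven all (A) = zip-driven all (B), for equal lengths
theorem pvAllA_eq_zip (know : List String) (w o : List Int) (h : o.length = w.length) :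
    pvAllA know w o = (w.zip o).all (fun wj => pvEntryB know wj.1 wj.2) := by
  induction w generalizing o with
  | nil =>
    rw [List.length_nil, List.length_eq_zero_iff] at h
    subst h; rfl
  | cons a w ih =>
    cases o with
    | nil => simp at h
    | cons b o =>
      have h' : o.length = w.length := by simpa using h
      unfold pvAllA
      rw [List.length_cons, List.range_succ_eq_map]
      simp only [List.all_cons, List.all_map, List.zip_cons_cons]
      have h0 : (match PySem.List.pyGet? (a :: w) ((0 : Nat) : Int), PySem.List.pyGet? (b :: o) ((0 : Nat) : Int) with
          | some w', some j => pvEntryA know w' j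
          | _, _ => false) = pvEntryB know a b := by
        simp only [PySem.List.pyGet?_natCast]
        rfl
      rw [h0, ← ih o h']
      unfold pvAllA
      have ht : ∀ (i : Nat),
          (match PySem.List.pyGet? (a :: w) ((i + 1 : Nat) : Int), PySem.List.pyGet? (b :: o) ((i + 1 : Nat) : Int) with
            | some w', some j => pvEntryA know w' j
            | _, _ => false)
          = (match PySem.List.pyGet? w ((i : Nat) : Int), PySem.List.pyGet? o ((i : Nat) : Int) with
            | some w', some j => pvEntryA know w' j
            | _, _ => false) := by
        intro i
        simp only [PySem.List.pyGet?_natCast, List.getElem?_cons_succ]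
      have hfun : ((fun (i : Nat) =>
            match PySem.List.pyGet? (a :: w) ((i : Nat) : Int), PySem.List.pyGet? (b :: o) ((i : Nat) : Int) with
            | some w', some j => pvEntryA know w' j
            | _, _ => false) ∘ Nat.succ)
          = (fun (i : Nat) =>
            match PySem.List.pyGet? w ((i : Nat) : Int), PySem.List.pyGet? o ((i : Nat) : Int) with
            | some w', some j => pvEntryA know w' j
            | _, _ => false) := by
        funext i
        simp only [Function.comp_apply]
        exact ht i
      rw [hfun]

-- the sorted set difference A computes is a filter of range(N)
theorem pvCompSorted_eq_filter (N : Int) (xs : List Int) :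
    pvCompSorted N xs = (PySem.List.pyRange 0 N 1).filter (fun j => decide (j ∉ xs)) := by
  unfold pvCompSorted
  have hrng : PySem.Set.ofList (PySem.List.pyRange 0 N 1) = PySem.List.pyRange 0 N 1 :=
    PySem.Set.ofList_eq_self_of_nodup _ (PySem.List.nodup_pyRange_one ..)
  have hdiff : PySem.Set.diff (PySem.Set.ofList (PySem.List.pyRange 0 N 1)) (PySem.Set.ofList xs)
      = (PySem.List.pyRange 0 N 1).filter (fun j => decide (j ∉ xs)) := by
    rw [hrng]
    show List.filter _ _ = _
    apply List.filter_congr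
    intro j hj
    simp [PySem.Set.mem_ofList]
  rw [hdiff]
  apply PySem.List.sorted_eq_self_of_pairwise
  have := PySem.List.pairwise_lt_pyRange_one (a := 0) (b := N)
  exact List.Pairwise.imp (fun h => le_of_lt h) (this.sublist (List.filter_sublist))

-- membership in a guarded add-fold
theorem pvMem_foldl_guard_add {β : Type} (l : List β) (p : β → Bool) (f : β → List Int)
    (s : PySem.Set (List Int)) (y : List Int) :
    y ∈ l.foldl (fun res o => if p o then res.add (f o) else res) s ↔
      y ∈ s ∨ ∃ o ∈ l, p o = true ∧ y = f o := by
  rw [PySem.List.foldl_if_eq_foldl_filter p (fun res o => res.add (f o)) l s,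
    PySem.Set.mem_foldl_add]
  simp [List.mem_filter, and_assoc]

-- membership in can_cover's result set
theorem pvMem_canCover (N : Int) (w : List Int) (know : List String) (x : List Int) :
    x ∈ pvCanCover N w know ↔
      ∃ o : List Int, o.length = w.length ∧ (∀ j ∈ o, j ∈ PySem.List.pyRange 0 N 1) ∧
        o.Nodup ∧ pvAllA know w o = true ∧ x = PySem.List.sorted o (fun x => x) := by
  unfold pvCanCover
  have hcongr : (pvProdRep N w.length).foldl
      (fun res o =>
        if pvAllA know w o then
          if PySem.Set.len (PySem.Set.ofList o) == (o.length : Int) then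
            res.add (PySem.List.sorted o (fun x => x))
          else res
        else res) PySem.Set.empty
      = (pvProdRep N w.length).foldl
        (fun res o =>
          if pvAllA know w o && (PySem.Set.len (PySem.Set.ofList o) == (o.length : Int)) then
            res.add (PySem.List.sorted o (fun x => x))
          else res) PySem.Set.empty := by
    apply PySem.List.foldl_congr_mem
    intro acc o _
    by_cases h1 : pvAllA know w o
    · by_cases h2 : (PySem.Set.len (PySem.Set.ofList o) == (o.length : Int)) = true
      · rw [if_pos h1, if_pos h2, if_pos (by rw [h1, h2]; rfl)]
      · rw [if_pos h1, if_neg h2, if_neg (fun hcon => h2 ((Bool.and_eq_true _ _).mp hcon).2)]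
    · rw [if_neg h1, if_neg (fun hcon => h1 ((Bool.and_eq_true _ _).mp hcon).1)]
  rw [hcongr, pvMem_foldl_guard_add]
  simp only [PySem.Set.empty, List.not_mem_nil, false_or, Bool.and_eq_true, pvMem_prodRep,
    pvDistinct_iff]
  exact exists_congr (fun o => by tauto)

-- membership in subsets(xs)
theorem pvMem_subsets (xs s : List Int) : s ∈ pvSubsets xs ↔ s.Sublist xs := by
  induction xs generalizing s with
  | nil => simp [pvSubsets, List.sublist_nil]
  | cons x xs ih =>
    simp only [pvSubsets, List.mem_append, List.mem_map, List.sublist_cons_iff]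
    constructor
    · rintro (h | ⟨t, ht, rfl⟩)
      · exact Or.inl ((ih s).mp h)
      · exact Or.inr ⟨t, rfl, (ih t).mp ht⟩
    · rintro (h | ⟨t, rfl, ht⟩)
      · exact Or.inl ((ih s).mpr h)
      · exact Or.inr ⟨t, (ih t).mpr ht, rfl⟩

-- two strictly increasing lists with subset members form a sublist
theorem pvSublist_of_subset_sorted :
    ∀ (r l : List Int), l.Pairwise (· < ·) → r.Pairwise (· < ·) → (∀ x ∈ l, x ∈ r) →
      l.Sublist r := by
  intro r
  induction r with
  | nil =>
    intro l _ _ hsub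
    rw [List.subset_nil.mp hsub]
  | cons y r ih =>
    intro l hl hr hsub
    cases l with
    | nil => exact List.nil_sublist _
    | cons x l =>
      obtain ⟨hx, hl'⟩ := List.pairwise_cons.mp hl
      obtain ⟨hy, hr'⟩ := List.pairwise_cons.mp hr
      by_cases hxy : x = y
      · subst hxy
        refine List.Sublist.cons₂ x (ih l hl' hr' ?_)
        intro z hz
        have hxz : x < z := hx z hz
        rcases List.mem_cons.mp (hsub z (by simp [hz])) with rfl | h
        · exact absurd hxz (lt_irrefl z)
        · exact h
      · have hxr : x ∈ r := by
          rcases List.mem_cons.mp (hsub x (by simp)) with h | h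
          · exact absurd h hxy
          · exact h
        have hyx : y < x := hy x hxr
        refine List.Sublist.cons y (ih (x :: l) hl hr' ?_)
        intro z hz
        rcases List.mem_cons.mp hz with rfl | hz'
        · exact hxr
        · have hxz : x < z := hx z hz'
          rcases List.mem_cons.mp (hsub z hz) with rfl | h
          · exact absurd (hyx.trans hxz) (lt_irrefl z)
          · exact h

-- pm decides: some permutation of ss matches the workers edge-wise
theorem pvPm_iff (after : List String) (ws ss : List Int) (hss : ss.Nodup) :
    pvPm after ws ss = true ↔
      ∃ p : List Int, p.length = ws.length ∧ p.Perm ss ∧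
        ((ws.zip p).all (fun wj => pvEntryB after wj.1 wj.2)) = true := by
  induction ws generalizing ss with
  | nil =>
    simp only [pvPm, List.isEmpty_iff, List.length_nil, List.length_eq_zero_iff]
    constructor
    · rintro rfl
      exact ⟨[], rfl, List.Perm.refl _, rfl⟩
    · rintro ⟨p, rfl, hp, -⟩
      exact (List.Perm.nil_eq hp).symm
  | cons w rest ih =>
    simp only [pvPm, List.any_eq_true, Bool.and_eq_true]
    constructor
    · rintro ⟨j, hj, hentry, hpm⟩
      have hfil : ss.filter (fun x => decide (x ≠ j)) = ss.erase j := by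
        rw [List.Nodup.erase_eq_filter hss]
        exact List.filter_congr (fun x _ => by by_cases h : x = j <;> simp [h])
      obtain ⟨p', hlen, hperm, hzip⟩ :=
        (ih (ss.filter (fun x => decide (x ≠ j))) (hss.filter _)).mp hpm
      refine ⟨j :: p', by simp [hlen], ?_, ?_⟩
      · rw [hfil] at hperm
        exact ((hperm.cons j).trans (List.perm_cons_erase hj).symm)
      · simp [hentry, hzip]
    · rintro ⟨p, hlen, hperm, hzip⟩
      cases p with
      | nil => simp at hlen
      | cons j p' =>
        have hj : j ∈ ss := hperm.subset (by simp)
        obtain ⟨hentry, hzip'⟩ := by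
          simpa using hzip
        refine ⟨j, hj, hentry, ?_⟩
        have hfil : ss.filter (fun x => decide (x ≠ j)) = ss.erase j := by
          rw [List.Nodup.erase_eq_filter hss]
          exact List.filter_congr (fun x _ => by by_cases h : x = j <;> simp [h])
        apply (ih (ss.filter (fun x => decide (x ≠ j))) (hss.filter _)).mpr
        refine ⟨p', by simpa using hlen, ?_, by simpa using hzip'⟩
        rw [hfil]
        exact (List.cons_perm_iff_perm_erase.mp hperm).2

-- for a sublist ss of range(N), pm coincides with membership in can_cover's set
theorem pvPm_eq_mem_canCover (N : Int) (after : List String) (w ss : List Int)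
    (hss : ss.Sublist (PySem.List.pyRange 0 N 1)) :
    (pvPm after w ss = true) ↔ ss ∈ pvCanCover N w after := by
  have hnd : ss.Nodup := (PySem.List.nodup_pyRange_one (a := 0) (b := N)).sublist hss
  have hpw : ss.Pairwise (· < ·) :=
    (PySem.List.pairwise_lt_pyRange_one (a := 0) (b := N)).sublist hss
  rw [pvPm_iff after w ss hnd, pvMem_canCover]
  constructor
  · rintro ⟨p, hlen, hperm, hzip⟩
    refine ⟨p, hlen, ?_, hperm.nodup_iff.mpr hnd, ?_, ?_⟩
    · intro j hj
      exact hss.subset (hperm.subset hj)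
    · rw [pvAllA_eq_zip after w p hlen]
      exact hzip
    · exact (PySem.List.sorted_eq_of_perm_of_pairwise_lt _ _ _ hperm.symm hpw).symm
  · rintro ⟨o, hlen, hrng, hnd', hall, hx⟩
    refine ⟨o, hlen, ?_, ?_⟩
    · have : ss.Perm o := hx ▸ PySem.List.sorted_perm ..
      exact this.symm
    · rw [← pvAllA_eq_zip after w o hlen]
      exact hall

-- A's per-subset check coincides with B's inner all, for ws a sublist of range(N)
theorem pvPairA_iff (N : Int) (after : List String) (w : List Int) :
    (∀ c ∈ pvCanCover N w after, pvCompSorted N c ∈ pvCanCover N (pvCompSorted N w) after)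
      ↔ (∀ ss ∈ pvSubsets (PySem.List.pyRange 0 N 1),
          pvPm after w ss = true →
          pvPm after ((PySem.List.pyRange 0 N 1).filter (fun x => decide (x ∉ w)))
            ((PySem.List.pyRange 0 N 1).filter (fun j => decide (j ∉ ss))) = true) := by
  have hrngpw := PySem.List.pairwise_lt_pyRange_one (a := (0 : Int)) (b := N)
  constructor
  · intro h ss hmem hpm
    have hsub := (pvMem_subsets _ ss).mp hmem
    have hcc := (pvPm_eq_mem_canCover N after w ss hsub).mp hpm
    have h2 := h ss hcc
    rw [pvCompSorted_eq_filter N ss, pvCompSorted_eq_filter N w] at h2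
    exact (pvPm_eq_mem_canCover N after _ _ List.filter_sublist).mpr h2
  · intro h c hc
    -- c = sorted o for a nodup o ⊆ range(N), hence c is a sublist of range(N)
    obtain ⟨o, hlen, hrng, hnd, hall, rfl⟩ := (pvMem_canCover N w after c).mp hc
    have hperm : (PySem.List.sorted o (fun x => x)).Perm o := PySem.List.sorted_perm ..
    have hcnd : (PySem.List.sorted o (fun x => x)).Nodup := hperm.nodup_iff.mpr hnd
    have hcle : (PySem.List.sorted o (fun x => x)).Pairwise (· ≤ ·) := by
      have := PySem.List.sorted_pairwise (xs := o) (key := fun x : Int => x)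
      exact this
    have hclt : (PySem.List.sorted o (fun x => x)).Pairwise (· < ·) := by
      have := hcle.and hcnd
      exact this.imp (fun hab => lt_of_le_of_ne hab.1 hab.2)
    have hsub : (PySem.List.sorted o (fun x => x)).Sublist (PySem.List.pyRange 0 N 1) := by
      apply pvSublist_of_subset_sorted _ _ hclt hrngpw
      intro x hx
      exact hrng x (hperm.subset hx)
    have hpm : pvPm after w (PySem.List.sorted o (fun x => x)) = true := by
      apply (pvPm_eq_mem_canCover N after w _ hsub).mpr
      exact hc
    have h2 := h _ ((pvMem_subsets _ _).mpr hsub) hpm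
    rw [pvCompSorted_eq_filter N (PySem.List.sorted o (fun x => x)), pvCompSorted_eq_filter N w]
    exact (pvPm_eq_mem_canCover N after _ _ List.filter_sublist).mp h2

theorem pvMain (N : Int) (after : List String) : is_ok2 N after = is_ok2_alt N after := by
  rw [Bool.eq_iff_iff]
  simp only [is_ok2, is_ok2_alt, List.all_eq_true, decide_eq_true_eq, Bool.not_eq_eq_eq_not,
    Bool.not_true, Bool.and_eq_false_iff]
  rcases lt_or_ge N 0 with hneg | hpos
  · -- N < 0 : A's outer range and range(N) are both empty; both sides trivially true
    rw [PySem.List.pyRange_one_eq_nil (a := 0) (b := N + 1) (by omega),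
      PySem.List.pyRange_one_eq_nil (a := 0) (b := N) (by omega)]
    simp [pvSubsets, pvPm]
  · -- 0 ≤ N
    have hrngnd := PySem.List.nodup_pyRange_one (a := (0 : Int)) (b := N)
    constructor
    · intro h ws hws ss hss
      have hsub := (pvMem_subsets _ ws).mp hws
      have hi : ((ws.length : Int)) ∈ PySem.List.pyRange 0 (N+1) 1 := by
        rw [PySem.List.mem_pyRange_one]
        have hle := hsub.length_le
        rw [PySem.List.length_pyRange_one] at hle
        omega
      have hw : ws ∈ PySem.List.combinations (PySem.List.pyRange 0 N 1)
          ((ws.length : Int)).toNat := by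
        rw [PySem.List.mem_combinations_iff]
        exact ⟨hsub, by simp⟩
      have hb := (pvPairA_iff N after ws).mp (h _ hi _ hw) ss hss
      by_cases hpm : pvPm after ws ss = true
      · exact Or.inr (hb hpm)
      · exact Or.inl (by simpa using hpm)
    · intro h i hi w1 hw1
      obtain ⟨hsub, -⟩ := (PySem.List.mem_combinations_iff ..).mp hw1
      apply (pvPairA_iff N after w1).mpr
      intro ss hss hpm
      rcases h w1 ((pvMem_subsets _ w1).mpr hsub) ss hss with hfalse | hok
      · rw [hpm] at hfalse; cases hfalse
      · exact hok

-- ===== VERDICT (by name: the statement is the Claim_ definition above) =====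
theorem is_ok2_spec : Claim_equal_is_ok2 := by
  intro N after _ _
  unfold Spec_is_ok2
  exact pvMain N after
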